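-- pv_equiv track=rewrite | github.com/jinfanfrankhu/TokenizationResearch | Code/Old/Tokenize/trigram.py | char_trigrams_tokenize
-- ===== SOURCE A (Python) =====
-- def char_trigrams_tokenize(examples):
--     """
--     Converts each text in examples["text"] into a list of overlapping
--     3-character tokens, with whitespace.
--     For "apple" -> ["app", "ppl", "ple"].
--     """
--     tokenized_texts = []
--     for text in examples["text"]:
--         # Build trigrams in a sliding window
--         trigrams = []
--         for i in range(len(text) - 2):
--             trigrams.append(text[i : i + 3])
--
--         tokenized_texts.append(trigrams)
--
--     return {"tokens": tokenized_texts}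
-- ===== SOURCE B (Python) =====
-- def char_trigrams_tokenize(examples):
--     """
--     Streaming tokenizer: one left-to-right pass per text, remembering only
--     the previous two characters and emitting a trigram at each new character.
--     """
--     tokenized_texts = []
--     for text in examples["text"]:
--         grams = []
--         p1 = p2 = None
--         for ch in text:
--             if p2 is not None:
--                 grams.append(p2 + p1 + ch)
--             p1, p2 = ch, p1
--         tokenized_texts.append(grams)
--     return {"tokens": tokenized_texts}
-- ===== Notes on version B (the rewrite author's own statement) =====
-- stated objective: alternative
-- what changed: Replaces A's index-and-slice sliding window (range(len(text)-2) with text[i:i+3]) by a streaming state machine: one pass over the characters that keeps only the previous two characters and emits p2+p1+ch at each step, with no indexing or slicing.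
import Mathlib
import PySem

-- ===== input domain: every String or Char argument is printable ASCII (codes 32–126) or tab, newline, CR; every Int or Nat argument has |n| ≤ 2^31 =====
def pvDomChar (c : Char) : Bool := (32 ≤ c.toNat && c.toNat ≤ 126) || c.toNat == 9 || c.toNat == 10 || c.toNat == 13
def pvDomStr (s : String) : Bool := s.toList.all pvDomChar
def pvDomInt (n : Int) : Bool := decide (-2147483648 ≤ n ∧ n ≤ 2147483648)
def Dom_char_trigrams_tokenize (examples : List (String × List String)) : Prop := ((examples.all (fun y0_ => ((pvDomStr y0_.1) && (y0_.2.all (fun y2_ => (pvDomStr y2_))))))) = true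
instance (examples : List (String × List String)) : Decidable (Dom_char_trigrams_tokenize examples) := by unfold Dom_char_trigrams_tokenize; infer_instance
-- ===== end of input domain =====

-- B replaces A's index-and-slice sliding window by a streaming state machine that remembers only the previous two characters (alternative decomposition, same cost).

-- ===== PORT A =====
-- trigrams = []; for i in range(len(text) - 2): trigrams.append(text[i:i+3])
def pvTrigramsA (text : String) : List String :=
  (PySem.List.pyRange 0 (PySem.Str.len text - 2) 1).foldl
    (fun trigrams i =>
      trigrams ++ [String.ofList (PySem.List.slice text.toList (some i) (some (i + 3)))]) []

def char_trigrams_tokenize (examples : List (String × List String)) : List (String × List (List String)) :=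
  let texts := (examples.lookup "text").getD []   -- examples["text"]; Pre_ guarantees the key is present
  let tokenized_texts := texts.foldl (fun acc text => acc ++ [pvTrigramsA text]) []
  [("tokens", tokenized_texts)]

-- ===== PORT B =====
-- state = (grams, p1, p2); per char: if p2 is not None: grams.append(p2 + p1 + ch); p1, p2 = ch, p1
-- (Python's 'p2 + p1 + ch' concatenates three 1-char strings; ported exactly as String.ofList [c2, c1, ch])
def pvStepB (st : List String × Option Char × Option Char) (ch : Char) :
    List String × Option Char × Option Char :=
  match st with
  | (grams, p1, p2) =>
    let grams := match p2, p1 with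
      | some c2, some c1 => grams ++ [String.ofList [c2, c1, ch]]
      | _, _ => grams
    (grams, some ch, p1)

def pvTrigramsB (text : String) : List String :=
  (text.toList.foldl pvStepB ([], none, none)).1

def char_trigrams_tokenize_alt (examples : List (String × List String)) : List (String × List (List String)) :=
  let texts := (examples.lookup "text").getD []
  let tokenized_texts := texts.foldl (fun acc text => acc ++ [pvTrigramsB text]) []
  [("tokens", tokenized_texts)]

-- ===== PRECONDITION & SPEC =====
-- Pre_ excludes exactly the dicts without a "text" key, on which the Python A raises KeyError.
def Pre_char_trigrams_tokenize (examples : List (String × List String)) : Prop :=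
  (examples.lookup "text").isSome = true
instance (examples : List (String × List String)) : Decidable (Pre_char_trigrams_tokenize examples) := by unfold Pre_char_trigrams_tokenize; infer_instance

def pvWitness_char_trigrams_tokenize : (List (String × List String)) := [("text", ["apple", "ab"])]

def Spec_char_trigrams_tokenize (examples : List (String × List String)) (out : List (String × List (List String))) : Prop := out = char_trigrams_tokenize_alt examples
instance (examples : List (String × List String)) (out : List (String × List (List String))) : Decidable (Spec_char_trigrams_tokenize examples out) := by unfold Spec_char_trigrams_tokenize; infer_instance

-- ===== CLAIM (what is proved, stated in full; the proofs are below) =====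
def Claim_equal_char_trigrams_tokenize : Prop := ∀ (examples : List (String × List String)), Dom_char_trigrams_tokenize examples → Pre_char_trigrams_tokenize examples → Spec_char_trigrams_tokenize examples (char_trigrams_tokenize examples)

-- ===== LEMMAS AND PROOFS =====
-- common characterisation: all 3-char windows of cs
def triSpec (cs : List Char) : List String :=
  (List.range (cs.length - 2)).map (fun k => String.ofList ((cs.drop k).take 3))

theorem triSpec_cons (a b c : Char) (t : List Char) :
    triSpec (a :: b :: c :: t) = String.ofList [a, b, c] :: triSpec (b :: c :: t) := by
  unfold triSpec
  simp only [List.length_cons]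
  rw [show t.length + 1 + 1 + 1 - 2 = (t.length + 1 + 1 - 2) + 1 by omega,
    List.range_succ_eq_map, List.map_cons, List.map_map]
  rfl

theorem loopB (cs : List Char) : ∀ (g : List String) (a b : Char),
    (cs.foldl pvStepB (g, some b, some a)).1 = g ++ triSpec (a :: b :: cs) := by
  induction cs with
  | nil => intro g a b; simp [triSpec]
  | cons c t ih =>
    intro g a b
    rw [List.foldl_cons, show pvStepB (g, some b, some a) c
        = (g ++ [String.ofList [a, b, c]], some c, some b) from rfl,
      ih, triSpec_cons, List.append_assoc]
    rfl

theorem trigramsB_eq (text : String) : pvTrigramsB text = triSpec text.toList := by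
  unfold pvTrigramsB
  match h : text.toList with
  | [] => rfl
  | [a] => rfl
  | a :: b :: t =>
    rw [List.foldl_cons, List.foldl_cons,
      show pvStepB ([], none, none) a = ([], some a, none) from rfl,
      show pvStepB (([] : List String), some a, none) b = ([], some b, some a) from rfl,
      loopB]
    rfl

theorem trigramsA_eq (text : String) : pvTrigramsA text = triSpec text.toList := by
  unfold pvTrigramsA triSpec
  rw [PySem.List.foldl_append_singleton_eq_map, PySem.List.pyRange_one, List.nil_append,
    List.map_map]
  have hlen : ((PySem.Str.len text - 2) - 0).toNat = text.toList.length - 2 := by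
    simp [PySem.Str.len_eq]; omega
  rw [hlen]
  refine List.map_congr_left ?_
  intro k hk
  simp only [Function.comp_apply, zero_add]
  rw [show ((k : Int) + 3) = ((k : Int) + ((3 : Nat) : Int)) by push_cast; rfl,
    PySem.List.slice_natCast_add]

-- ===== VERDICT (by name: the statement is the Claim_ definition above) =====
theorem char_trigrams_tokenize_spec : Claim_equal_char_trigrams_tokenize := by
  intro examples _ _
  show char_trigrams_tokenize examples = char_trigrams_tokenize_alt examples
  unfold char_trigrams_tokenize char_trigrams_tokenize_alt
  dsimp only
  rw [PySem.List.foldl_append_singleton_eq_map, PySem.List.foldl_append_singleton_eq_map,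
    funext (fun t => (trigramsA_eq t).trans (trigramsB_eq t).symm)]
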